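-- pv_equiv track=rewrite | github.com/alexanderperkins/NEU-Python-HW-and-Projects | lab6-alexanderperkins/end_x.py | print_string
-- ===== SOURCE A (Python) =====
-- def print_string(string: str):
--     """
--     Implement a recursive function that takes as input a str and prints
--     the characters of the str while moving x's to the end *without using a loop*.
--     """
--     if string == '':
--         return string
--     if string[0] == 'x':
--         print_string(string[1:])
--         return print_string(string[1:]) + 'x'
--     else:
--         return string[0] + print_string(string[1:])
-- ===== SOURCE B (Python) =====
-- def print_string(string: str):
--     parts = [c for c in string if c != 'x']
--     return ''.join(parts) + 'x' * (len(string) - len(parts))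
-- ===== Notes on version B (the rewrite author's own statement) =====
-- stated objective: faster
-- what changed: Replaced the doubly-recursive character scan (which recurses twice on every 'x') with a single-pass filter of the non-'x' characters followed by appending the counted 'x's.
import Mathlib
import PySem

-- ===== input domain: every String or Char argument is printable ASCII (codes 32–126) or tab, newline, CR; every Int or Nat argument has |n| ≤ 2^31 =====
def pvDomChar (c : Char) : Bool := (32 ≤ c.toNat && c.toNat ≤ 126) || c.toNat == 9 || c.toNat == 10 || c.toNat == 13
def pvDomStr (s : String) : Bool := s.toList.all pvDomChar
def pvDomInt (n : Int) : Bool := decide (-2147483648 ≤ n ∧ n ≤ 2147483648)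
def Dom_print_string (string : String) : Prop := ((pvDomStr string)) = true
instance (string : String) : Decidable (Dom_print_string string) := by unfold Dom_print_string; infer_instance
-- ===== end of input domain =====

-- B replaces A's doubly-recursive scan with one filter pass plus appended 'x's (faster).

-- ===== PORT A =====
-- literal transliteration of A's recursion, on the string's characters
-- (string == '' ↔ [],  string[0] ↔ c,  string[1:] ↔ rest; the discarded first
--  recursive call on the 'x' branch is kept as a let-binding)
def pvArec : List Char → List Char
  | [] => []
  | c :: rest =>
      if c = 'x' then
        let _ := pvArec rest
        pvArec rest ++ ['x']
      else
        c :: pvArec rest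

def print_string (string : String) : String := (pvArec string.toList).asString

-- ===== PORT B =====
def print_string_alt (string : String) : String :=
  let parts := string.toList.filter (fun c => !(c == 'x'))
  (parts ++ List.replicate (string.toList.length - parts.length) 'x').asString

-- ===== PRECONDITION & SPEC =====
def Spec_print_string (string : String) (out : String) : Prop := out = print_string_alt string
instance (string : String) (out : String) : Decidable (Spec_print_string string out) := by unfold Spec_print_string; infer_instance

-- ===== CLAIM (what is proved, stated in full; the proofs are below) =====
def Claim_equal_print_string : Prop := ∀ (string : String), Dom_print_string string → Spec_print_string string (print_string string)

-- ===== LEMMAS AND PROOFS =====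

theorem pvArec_eq_filter_count (l : List Char) :
    pvArec l = l.filter (fun c => !(c == 'x')) ++ List.replicate (l.count 'x') 'x' := by
  induction l with
  | nil => simp [pvArec]
  | cons c rest ih =>
    by_cases h : c = 'x'
    · subst h
      simp [pvArec, ih, List.replicate_succ']
    · simp [pvArec, h, ih]

theorem filter_length_count (l : List Char) :
    l.length - (l.filter (fun c => !(c == 'x'))).length = l.count 'x' := by
  induction l with
  | nil => simp
  | cons c rest ih =>
    by_cases h : c = 'x'
    · subst h
      simp [← ih]
      have := List.length_filter_le (fun c => !(c == 'x')) rest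
      omega
    · simp [h, ih]

-- ===== VERDICT (by name: the statement is the Claim_ definition above) =====
theorem print_string_spec : Claim_equal_print_string := by
  intro s _
  unfold Spec_print_string print_string print_string_alt
  show (pvArec s.toList).asString =
    ((s.toList.filter (fun c => !(c == 'x'))) ++
      List.replicate (s.toList.length - (s.toList.filter (fun c => !(c == 'x'))).length) 'x').asString
  rw [pvArec_eq_filter_count, filter_length_count]
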